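-- pv_equiv track=rewrite | github.com/BinbinGood/Algorithms | 进阶班/class03KMP马拉车双端队列单调栈/指标A最大值.py | max1
-- ===== SOURCE A (Python) =====
-- def max1(arr):
--     max1 = -1  # 假设没有负数
--     for i in range(len(arr)):
--         for j in range(i, len(arr), 1):
--             minnum = 1000000  # 假设最大值不超过100万
--             sum = 0
--             for k in range(i, j + 1, 1):
--                 sum += arr[k]
--                 minnum = min(minnum, arr[k])
--             max1 = max(max1, minnum * sum)
--     return max1
-- ===== SOURCE B (Python) =====
-- def max1(arr):
--     n = len(arr)
--     ans = -1  # same baseline as the spec: assume answer at least -1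
--     for i in range(n):
--         s = 0
--         mn = 1000000  # same cap as the spec: values assumed <= 1,000,000
--         for j in range(i, n):
--             s += arr[j]
--             mn = min(mn, arr[j])
--             ans = max(ans, mn * s)
--     return ans
-- ===== Notes on version B (the rewrite author's own statement) =====
-- stated objective: faster
-- what changed: B maintains the running sum and running minimum incrementally while extending the subarray's right end, removing A's innermost recomputation loop (O(n^3) -> O(n^2)).
import Mathlib
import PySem

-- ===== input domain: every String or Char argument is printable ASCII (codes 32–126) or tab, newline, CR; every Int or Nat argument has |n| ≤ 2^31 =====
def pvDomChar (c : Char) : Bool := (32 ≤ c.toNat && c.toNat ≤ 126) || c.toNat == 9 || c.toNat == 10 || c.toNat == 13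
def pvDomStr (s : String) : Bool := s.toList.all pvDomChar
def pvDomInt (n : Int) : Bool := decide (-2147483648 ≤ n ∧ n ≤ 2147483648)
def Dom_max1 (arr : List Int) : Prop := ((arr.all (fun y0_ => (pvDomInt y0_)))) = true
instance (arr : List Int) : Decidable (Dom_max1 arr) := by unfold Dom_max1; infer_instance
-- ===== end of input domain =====

-- B maintains the running sum and minimum incrementally while extending the right end,
-- removing A's innermost recomputation loop (O(n^3) → O(n^2)); return values are identical.

-- ===== PORT A =====
-- indices k produced by the ranges are always in bounds, so pyGetD's default is never used
def max1 (arr : List Int) : Int :=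
  (PySem.List.pyRange 0 (arr.length : Int) 1).foldl
    (fun max1v i =>
      (PySem.List.pyRange i (arr.length : Int) 1).foldl
        (fun max1v j =>
          let p : Int × Int :=
            (PySem.List.pyRange i (j + 1) 1).foldl
              (fun st k => (st.1 + PySem.List.pyGetD arr k 0, min st.2 (PySem.List.pyGetD arr k 0)))
              (0, 1000000)
          max max1v (p.2 * p.1))
        max1v)
    (-1)

-- ===== PORT B =====
def max1_alt (arr : List Int) : Int :=
  (PySem.List.pyRange 0 (arr.length : Int) 1).foldl
    (fun ans i =>
      ((PySem.List.pyRange i (arr.length : Int) 1).foldl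
        (fun (st : Int × Int × Int) j =>
          let s := st.1 + PySem.List.pyGetD arr j 0
          let mn := min st.2.1 (PySem.List.pyGetD arr j 0)
          (s, mn, max st.2.2 (mn * s)))
        (0, 1000000, ans)).2.2)
    (-1)

-- ===== PRECONDITION & SPEC =====
def Spec_max1 (arr : List Int) (out : Int) : Prop := out = max1_alt arr
instance (arr : List Int) (out : Int) : Decidable (Spec_max1 arr out) := by unfold Spec_max1; infer_instance

-- ===== CLAIM (what is proved, stated in full; the proofs are below) =====
def Claim_equal_max1 : Prop := ∀ (arr : List Int), Dom_max1 arr → Spec_max1 arr (max1 arr)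

-- ===== LEMMAS AND PROOFS =====

-- the (sum, min) recomputation step of A's innermost loop
def pvStep (arr : List Int) (st : Int × Int) (k : Int) : Int × Int :=
  (st.1 + PySem.List.pyGetD arr k 0, min st.2 (PySem.List.pyGetD arr k 0))

-- (sum, min) of arr[i:j] the way A computes it
def pvP (arr : List Int) (i j : Int) : Int × Int :=
  (PySem.List.pyRange i j 1).foldl (pvStep arr) (0, 1000000)

-- B's inner loop body
def pvB (arr : List Int) (st : Int × Int × Int) (j : Int) : Int × Int × Int :=
  (st.1 + PySem.List.pyGetD arr j 0, min st.2.1 (PySem.List.pyGetD arr j 0),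
   max st.2.2 (min st.2.1 (PySem.List.pyGetD arr j 0) * (st.1 + PySem.List.pyGetD arr j 0)))

-- A's inner loop body, expressed through pvP
def pvA (arr : List Int) (i m j : Int) : Int :=
  max m ((pvP arr i (j + 1)).2 * (pvP arr i (j + 1)).1)

theorem pvP_succ (arr : List Int) (i j : Int) (h : i ≤ j) :
    pvP arr i (j + 1) = pvStep arr (pvP arr i j) j := by
  unfold pvP
  rw [PySem.List.pyRange_one_succ_right h, List.foldl_append]
  rfl

theorem pvP_self (arr : List Int) (i : Int) : pvP arr i i = (0, 1000000) := by
  unfold pvP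
  rw [PySem.List.pyRange_one_eq_nil le_rfl]
  rfl

theorem pv_inner_eq (arr : List Int) (i : Int) :
    ∀ (fuel : Nat) (j m : Int), i ≤ j → ((arr.length : Int) - j).toNat ≤ fuel →
    ((PySem.List.pyRange j (arr.length : Int) 1).foldl (pvB arr)
        ((pvP arr i j).1, (pvP arr i j).2, m)).2.2
      = (PySem.List.pyRange j (arr.length : Int) 1).foldl (pvA arr i) m := by
  intro fuel
  induction fuel with
  | zero =>
      intro j m hij hf
      have hjn : (arr.length : Int) ≤ j := by omega
      rw [PySem.List.pyRange_one_eq_nil hjn]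
      rfl
  | succ f ih =>
      intro j m hij hf
      by_cases hjn : (arr.length : Int) ≤ j
      · rw [PySem.List.pyRange_one_eq_nil hjn]
        rfl
      · push Not at hjn
        rw [PySem.List.pyRange_one_cons hjn]
        simp only [List.foldl_cons]
        have hstep : pvB arr ((pvP arr i j).1, (pvP arr i j).2, m) j
            = ((pvP arr i (j + 1)).1, (pvP arr i (j + 1)).2, pvA arr i m j) := by
          unfold pvA
          rw [pvP_succ arr i j hij]
          rfl
        rw [hstep]
        exact ih (j + 1) (pvA arr i m j) (by omega) (by omega)

theorem pv_inner_full (arr : List Int) (i m : Int) :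
    ((PySem.List.pyRange i (arr.length : Int) 1).foldl (pvB arr) (0, 1000000, m)).2.2
      = (PySem.List.pyRange i (arr.length : Int) 1).foldl (pvA arr i) m := by
  have h := pv_inner_eq arr i ((arr.length : Int) - i).toNat i m le_rfl le_rfl
  rwa [pvP_self] at h

-- ===== VERDICT (by name: the statement is the Claim_ definition above) =====
theorem max1_spec : Claim_equal_max1 := by
  intro arr _
  unfold Spec_max1 max1 max1_alt
  have hf : (fun (max1v i : Int) =>
      (PySem.List.pyRange i (arr.length : Int) 1).foldl
        (fun max1v j =>
          let p : Int × Int :=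
            (PySem.List.pyRange i (j + 1) 1).foldl
              (fun st k => (st.1 + PySem.List.pyGetD arr k 0, min st.2 (PySem.List.pyGetD arr k 0)))
              (0, 1000000)
          max max1v (p.2 * p.1))
        max1v)
      = (fun (ans i : Int) =>
      ((PySem.List.pyRange i (arr.length : Int) 1).foldl
        (fun (st : Int × Int × Int) j =>
          let s := st.1 + PySem.List.pyGetD arr j 0
          let mn := min st.2.1 (PySem.List.pyGetD arr j 0)
          (s, mn, max st.2.2 (mn * s)))
        (0, 1000000, ans)).2.2) := by
    funext m i
    exact (pv_inner_full arr i m).symm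
  rw [hf]
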